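-- pv_equiv track=rewrite | github.com/LenchikTs/client | library/TNMS/TNMSComboBox.py | convertTNMSStringToDict
-- ===== SOURCE A (Python) =====
-- def convertTNMSStringToDict(s):
--     result = {}
--     mode = 0 # 0: initial, 1: prefix entered, 2: arg code entered
--     prefix = ''
--     param = ''
--     value = ''
--
--     for c in s:
--         if mode == 0:
--             if c in 'cp':
--                 prefix = c
--                 mode = 1
--                 continue
--             elif c.isspace():
--                 mode = 0
--             prefix = ''
--             mode = 1
--         if mode == 1:
--             if c in 'TNMS':
--                 mode = 2
--                 param = c
--                 value = ''
--                 continue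
--             else:
--                 mode = 3
--         if mode == 2:
--             if c.isspace():
--                 result[prefix+param] = value
--                 mode = 0
--             else:
--                 value += c
--
--         if mode == 3:
--            if c.isspace():
--                mode = 0
--                continue
--
--     if mode == 2:
--         result[prefix+param] = value
--     return result
-- ===== SOURCE B (Python) =====
-- def convertTNMSStringToDict(s):
--     result = {}
--     for tok in s.split():
--         pre, body = (tok[0], tok[1:]) if tok[0] in 'cp' else ('', tok)
--         if body and body[0] in 'TNMS':
--             result[pre + body[0]] = body[1:]
--     return result
-- ===== Notes on version B (the rewrite author's own statement) =====
-- stated objective: simpler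
-- what changed: Replaced A's single-pass four-mode character state machine (mutable mode/prefix/param/value with fallthrough transitions) by a tokenize-then-parse decomposition: split the string on whitespace, then read an optional prefix character and a parameter code from each token.
import Mathlib
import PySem

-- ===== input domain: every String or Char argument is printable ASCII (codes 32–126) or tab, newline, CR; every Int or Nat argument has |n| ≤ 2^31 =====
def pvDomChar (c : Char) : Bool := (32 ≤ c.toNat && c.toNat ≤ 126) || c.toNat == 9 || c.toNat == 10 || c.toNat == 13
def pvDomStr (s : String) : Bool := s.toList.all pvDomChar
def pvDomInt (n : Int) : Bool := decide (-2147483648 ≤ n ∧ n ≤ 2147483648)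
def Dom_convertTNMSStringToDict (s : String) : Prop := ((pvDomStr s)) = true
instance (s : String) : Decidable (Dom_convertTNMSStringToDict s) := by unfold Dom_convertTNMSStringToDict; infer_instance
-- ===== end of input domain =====

-- B replaces A's single-pass four-mode character state machine by a tokenize-then-parse
-- decomposition (split on whitespace, then read an optional 'c'/'p' prefix and a 'TNMS'
-- code per token); objective: simpler (measured faster: the C-level str.split replaces the per-character Python loop).

-- ===== PORT A =====
-- A's loop state is (result, mode, prefix, param, value); the Python fallthroughs (a mode-0
-- character falling into the mode-1 test, a failed mode-1 test falling into the mode-3 test)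
-- become the tnmsGo* calls below.

def tnmsGo3 (r : PySem.Dict String String) (pre par val : List Char) (c : Char) :
    PySem.Dict String String × Nat × List Char × List Char × List Char :=
  if PySem.Chars.isspace c then (r, 0, pre, par, val) else (r, 3, pre, par, val)
def tnmsGo2 (r : PySem.Dict String String) (pre par val : List Char) (c : Char) :
    PySem.Dict String String × Nat × List Char × List Char × List Char :=
  if PySem.Chars.isspace c then
    (r.insert (String.ofList (pre ++ par)) (String.ofList val), 0, pre, par, val)
  else (r, 2, pre, par, val ++ [c])
def tnmsGo1 (r : PySem.Dict String String) (pre par val : List Char) (c : Char) :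
    PySem.Dict String String × Nat × List Char × List Char × List Char :=
  if c = 'T' ∨ c = 'N' ∨ c = 'M' ∨ c = 'S' then (r, 2, pre, [c], [])
  else tnmsGo3 r pre par val c
def tnmsStep (st : PySem.Dict String String × Nat × List Char × List Char × List Char) (c : Char) :
    PySem.Dict String String × Nat × List Char × List Char × List Char :=
  let (r, m, pre, par, val) := st
  if m = 0 then
    if c = 'c' ∨ c = 'p' then (r, 1, [c], par, val)
    else tnmsGo1 r [] par val c
  else if m = 1 then tnmsGo1 r pre par val c
  else if m = 2 then tnmsGo2 r pre par val c
  else tnmsGo3 r pre par val c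
def tnmsFinish (st : PySem.Dict String String × Nat × List Char × List Char × List Char) :
    PySem.Dict String String :=
  if st.2.1 = 2 then st.1.insert (String.ofList (st.2.2.1 ++ st.2.2.2.1)) (String.ofList st.2.2.2.2) else st.1

def convertTNMSStringToDict (s : String) : List (String × String) :=
  (tnmsFinish (s.toList.foldl tnmsStep ((PySem.Dict.empty : PySem.Dict String String), 0,
    ([] : List Char), ([] : List Char), ([] : List Char)))).items

-- ===== PORT B =====
-- one token of s.split(): an optional 'c'/'p' prefix char, then a 'TNMS' code, rest is the value

def tnmsBody (r : PySem.Dict String String) (pre body : List Char) : PySem.Dict String String :=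
  match body with
  | [] => r
  | b0 :: bs =>
    if b0 = 'T' ∨ b0 = 'N' ∨ b0 = 'M' ∨ b0 = 'S' then
      r.insert (String.ofList (pre ++ [b0])) (String.ofList bs)
    else r
def tnmsTok (r : PySem.Dict String String) (tok : List Char) : PySem.Dict String String :=
  match tok with
  | [] => r
  | t0 :: rest =>
    if t0 = 'c' ∨ t0 = 'p' then tnmsBody r [t0] rest else tnmsBody r [] (t0 :: rest)

def convertTNMSStringToDict_alt (s : String) : List (String × String) :=
  ((PySem.Chars.split₀ s.toList).foldl tnmsTok (PySem.Dict.empty : PySem.Dict String String)).items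

-- ===== PRECONDITION & SPEC =====
def Spec_convertTNMSStringToDict (s : String) (out : List (String × String)) : Prop := out = convertTNMSStringToDict_alt s
instance (s : String) (out : List (String × String)) : Decidable (Spec_convertTNMSStringToDict s out) := by unfold Spec_convertTNMSStringToDict; infer_instance

-- ===== CLAIM (what is proved, stated in full; the proofs are below) =====
def Claim_equal_convertTNMSStringToDict : Prop := ∀ (s : String), Dom_convertTNMSStringToDict s → Spec_convertTNMSStringToDict s (convertTNMSStringToDict s)

-- ===== LEMMAS AND PROOFS =====

-- A's mid-token state as a function of the characters `seen` since the last whitespace: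
-- [] ↔ mode 0; a lone prefix char ↔ mode 1; prefix?+code ↔ mode 2 with value = the rest
-- of the token so far; any other token shape ↔ mode 3 (skip to the next whitespace).
def TnmsInv (seen : List Char) (m : Nat) (pre par val : List Char) : Prop :=
  match seen with
  | [] => m = 0
  | t0 :: ts =>
    if t0 = 'c' ∨ t0 = 'p' then
      match ts with
      | [] => m = 1 ∧ pre = [t0]
      | b0 :: bs =>
        if b0 = 'T' ∨ b0 = 'N' ∨ b0 = 'M' ∨ b0 = 'S' then
          m = 2 ∧ pre = [t0] ∧ par = [b0] ∧ val = bs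
        else m = 3
    else
      if t0 = 'T' ∨ t0 = 'N' ∨ t0 = 'M' ∨ t0 = 'S' then
        m = 2 ∧ pre = [] ∧ par = [t0] ∧ val = ts
      else m = 3

lemma tnmsFinish_eq_tok (r : PySem.Dict String String) (seen : List Char) (m : Nat)
    (pre par val : List Char) (h : TnmsInv seen m pre par val) :
    tnmsFinish (r, m, pre, par, val) = tnmsTok r seen := by
  rcases seen with _ | ⟨t0, _ | ⟨b0, bs⟩⟩
  · simp only [TnmsInv] at h; subst h; simp [tnmsFinish, tnmsTok]
  · simp only [TnmsInv] at h
    by_cases hcp : t0 = 'c' ∨ t0 = 'p'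
    · rw [if_pos hcp] at h
      obtain ⟨hm, hp⟩ := h; subst hm hp
      simp [tnmsFinish, tnmsTok, tnmsBody, if_pos hcp]
    · rw [if_neg hcp] at h
      by_cases htn : t0 = 'T' ∨ t0 = 'N' ∨ t0 = 'M' ∨ t0 = 'S'
      · rw [if_pos htn] at h; obtain ⟨hm, hp, hq, hv⟩ := h; subst hm hp hq hv
        simp [tnmsFinish, tnmsTok, tnmsBody, if_neg hcp, if_pos htn]
      · rw [if_neg htn] at h; subst h
        simp [tnmsFinish, tnmsTok, tnmsBody, if_neg htn]
  · simp only [TnmsInv] at h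
    by_cases hcp : t0 = 'c' ∨ t0 = 'p'
    · rw [if_pos hcp] at h
      by_cases htn : b0 = 'T' ∨ b0 = 'N' ∨ b0 = 'M' ∨ b0 = 'S'
      · rw [if_pos htn] at h; obtain ⟨hm, hp, hq, hv⟩ := h; subst hm hp hq hv
        simp [tnmsFinish, tnmsTok, tnmsBody, if_pos hcp, if_pos htn]
      · rw [if_neg htn] at h; subst h
        simp [tnmsFinish, tnmsTok, tnmsBody, if_pos hcp, if_neg htn]
    · rw [if_neg hcp] at h
      by_cases htn : t0 = 'T' ∨ t0 = 'N' ∨ t0 = 'M' ∨ t0 = 'S'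
      · rw [if_pos htn] at h; obtain ⟨hm, hp, hq, hv⟩ := h; subst hm hp hq hv
        simp [tnmsFinish, tnmsTok, tnmsBody, if_neg hcp, if_pos htn]
      · rw [if_neg htn] at h; subst h
        simp [tnmsFinish, tnmsTok, tnmsBody, if_neg hcp, if_neg htn]

lemma tnmsStep_space (r : PySem.Dict String String) (seen : List Char) (m : Nat)
    (pre par val : List Char) (c : Char) (hc : PySem.Chars.isspace c = true)
    (h : TnmsInv seen m pre par val) :
    (tnmsStep (r, m, pre, par, val) c).1 = tnmsTok r seen ∧
    (tnmsStep (r, m, pre, par, val) c).2.1 = 0 := by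
  have hccp : ¬ (c = 'c' ∨ c = 'p') := by rintro (rfl | rfl) <;> exact absurd hc (by decide)
  have hctn : ¬ (c = 'T' ∨ c = 'N' ∨ c = 'M' ∨ c = 'S') := by
    rintro (rfl | rfl | rfl | rfl) <;> exact absurd hc (by decide)
  rcases seen with _ | ⟨t0, _ | ⟨b0, bs⟩⟩
  · simp only [TnmsInv] at h; subst h
    simp [tnmsStep, tnmsGo1, tnmsGo3, tnmsTok, if_neg hccp, if_neg hctn, hc]
  · simp only [TnmsInv] at h
    by_cases hcp : t0 = 'c' ∨ t0 = 'p'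
    · rw [if_pos hcp] at h; obtain ⟨hm, hp⟩ := h; subst hm hp
      simp [tnmsStep, tnmsGo1, tnmsGo3, tnmsTok, tnmsBody, if_pos hcp, if_neg hctn, hc]
    · rw [if_neg hcp] at h
      by_cases htn : t0 = 'T' ∨ t0 = 'N' ∨ t0 = 'M' ∨ t0 = 'S'
      · rw [if_pos htn] at h; obtain ⟨hm, hp, hq, hv⟩ := h; subst hm hp hq hv
        simp [tnmsStep, tnmsGo2, tnmsTok, tnmsBody, if_neg hcp, if_pos htn, hc]
      · rw [if_neg htn] at h; subst h
        simp [tnmsStep, tnmsGo3, tnmsTok, tnmsBody, if_neg htn, hc]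
  · simp only [TnmsInv] at h
    by_cases hcp : t0 = 'c' ∨ t0 = 'p'
    · rw [if_pos hcp] at h
      by_cases htn : b0 = 'T' ∨ b0 = 'N' ∨ b0 = 'M' ∨ b0 = 'S'
      · rw [if_pos htn] at h; obtain ⟨hm, hp, hq, hv⟩ := h; subst hm hp hq hv
        simp [tnmsStep, tnmsGo2, tnmsTok, tnmsBody, if_pos hcp, if_pos htn, hc]
      · rw [if_neg htn] at h; subst h
        simp [tnmsStep, tnmsGo3, tnmsTok, tnmsBody, if_pos hcp, if_neg htn, hc]
    · rw [if_neg hcp] at h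
      by_cases htn : t0 = 'T' ∨ t0 = 'N' ∨ t0 = 'M' ∨ t0 = 'S'
      · rw [if_pos htn] at h; obtain ⟨hm, hp, hq, hv⟩ := h; subst hm hp hq hv
        simp [tnmsStep, tnmsGo2, tnmsTok, tnmsBody, if_neg hcp, if_pos htn, hc]
      · rw [if_neg htn] at h; subst h
        simp [tnmsStep, tnmsGo3, tnmsTok, tnmsBody, if_neg hcp, if_neg htn, hc]

lemma tnmsStep_nonspace (r : PySem.Dict String String) (seen : List Char) (m : Nat)
    (pre par val : List Char) (c : Char) (hc : PySem.Chars.isspace c = false)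
    (h : TnmsInv seen m pre par val) :
    (tnmsStep (r, m, pre, par, val) c).1 = r ∧
    TnmsInv (seen ++ [c]) (tnmsStep (r, m, pre, par, val) c).2.1
      (tnmsStep (r, m, pre, par, val) c).2.2.1
      (tnmsStep (r, m, pre, par, val) c).2.2.2.1
      (tnmsStep (r, m, pre, par, val) c).2.2.2.2 := by
  rcases seen with _ | ⟨t0, _ | ⟨b0, bs⟩⟩
  · simp only [TnmsInv] at h; subst h
    by_cases hccp : c = 'c' ∨ c = 'p'
    · simp [tnmsStep, TnmsInv, if_pos hccp]
    · by_cases hctn : c = 'T' ∨ c = 'N' ∨ c = 'M' ∨ c = 'S'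
      · simp [tnmsStep, tnmsGo1, TnmsInv, if_neg hccp, if_pos hctn]
      · simp [tnmsStep, tnmsGo1, tnmsGo3, TnmsInv, if_neg hccp, if_neg hctn, hc]
  · simp only [TnmsInv] at h
    by_cases hcp : t0 = 'c' ∨ t0 = 'p'
    · rw [if_pos hcp] at h; obtain ⟨hm, hp⟩ := h; subst hm hp
      by_cases hctn : c = 'T' ∨ c = 'N' ∨ c = 'M' ∨ c = 'S'
      · simp [tnmsStep, tnmsGo1, TnmsInv, if_pos hcp, if_pos hctn]
      · simp [tnmsStep, tnmsGo1, tnmsGo3, TnmsInv, if_pos hcp, if_neg hctn, hc]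
    · rw [if_neg hcp] at h
      by_cases htn : t0 = 'T' ∨ t0 = 'N' ∨ t0 = 'M' ∨ t0 = 'S'
      · rw [if_pos htn] at h; obtain ⟨hm, hp, hq, hv⟩ := h; subst hm hp hq hv
        simp [tnmsStep, tnmsGo2, TnmsInv, if_neg hcp, if_pos htn, hc]
      · rw [if_neg htn] at h; subst h
        simp [tnmsStep, tnmsGo3, TnmsInv, if_neg hcp, if_neg htn, hc]
  · simp only [TnmsInv] at h
    by_cases hcp : t0 = 'c' ∨ t0 = 'p'
    · rw [if_pos hcp] at h
      by_cases htn : b0 = 'T' ∨ b0 = 'N' ∨ b0 = 'M' ∨ b0 = 'S'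
      · rw [if_pos htn] at h; obtain ⟨hm, hp, hq, hv⟩ := h; subst hm hp hq hv
        simp [tnmsStep, tnmsGo2, TnmsInv, if_pos hcp, if_pos htn, hc]
      · rw [if_neg htn] at h; subst h
        simp [tnmsStep, tnmsGo3, TnmsInv, if_pos hcp, if_neg htn, hc]
    · rw [if_neg hcp] at h
      by_cases htn : t0 = 'T' ∨ t0 = 'N' ∨ t0 = 'M' ∨ t0 = 'S'
      · rw [if_pos htn] at h; obtain ⟨hm, hp, hq, hv⟩ := h; subst hm hp hq hv
        simp [tnmsStep, tnmsGo2, TnmsInv, if_neg hcp, if_pos htn, hc]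
      · rw [if_neg htn] at h; subst h
        simp [tnmsStep, tnmsGo3, TnmsInv, if_neg hcp, if_neg htn, hc]

lemma split₀_go_acc (cs : List Char) : ∀ (cur : List Char) (acc : List (List Char)),
    PySem.Chars.split₀.go cs cur acc = acc.reverse ++ PySem.Chars.split₀.go cs cur [] := by
  induction cs with
  | nil => intro cur acc; simp only [PySem.Chars.split₀.go]; split_ifs <;> simp
  | cons c cs ih =>
    intro cur acc
    simp only [PySem.Chars.split₀.go]
    split_ifs with h1 h2
    · exact ih [] acc
    · rw [ih [] (cur.reverse :: acc), ih [] [cur.reverse]]; simp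
    · exact ih (c :: cur) acc

lemma tnms_main (cs : List Char) : ∀ (r : PySem.Dict String String) (m : Nat)
    (pre par val seen : List Char), TnmsInv seen m pre par val →
    tnmsFinish (cs.foldl tnmsStep (r, m, pre, par, val)) =
      (PySem.Chars.split₀.go cs seen.reverse []).foldl tnmsTok r := by
  induction cs with
  | nil =>
    intro r m pre par val seen h
    simp only [List.foldl_nil, PySem.Chars.split₀.go]
    rw [tnmsFinish_eq_tok r seen m pre par val h]
    rcases seen with _ | ⟨t0, ts⟩ <;> simp [tnmsTok]
  | cons c cs ih =>
    intro r m pre par val seen h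
    simp only [List.foldl_cons, PySem.Chars.split₀.go]
    have hIH0 := ih (tnmsStep (r, m, pre, par, val) c).1
      (tnmsStep (r, m, pre, par, val) c).2.1
      (tnmsStep (r, m, pre, par, val) c).2.2.1
      (tnmsStep (r, m, pre, par, val) c).2.2.2.1
      (tnmsStep (r, m, pre, par, val) c).2.2.2.2
    by_cases hc : PySem.Chars.isspace c = true
    · obtain ⟨h1, h2⟩ := tnmsStep_space r seen m pre par val c hc h
      rw [if_pos hc]
      have hIH : tnmsFinish (List.foldl tnmsStep (tnmsStep (r, m, pre, par, val) c) cs) =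
          (PySem.Chars.split₀.go cs [] []).foldl tnmsTok
            (tnmsStep (r, m, pre, par, val) c).1 :=
        hIH0 [] (by simp [TnmsInv, h2])
      by_cases hs : seen = []
      · rw [if_pos (by simp [hs]), hIH, h1, hs]
        simp [tnmsTok]
      · rw [if_neg (by simp [hs]), split₀_go_acc cs []]
        simp only [List.reverse_cons, List.reverse_nil, List.nil_append, List.reverse_reverse,
          List.foldl_append, List.foldl_cons, List.foldl_nil]
        rw [hIH, h1]
    · have hc' : PySem.Chars.isspace c = false := by simpa using hc
      obtain ⟨h1, h2⟩ := tnmsStep_nonspace r seen m pre par val c hc' h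
      rw [if_neg hc]
      have hIH : tnmsFinish (List.foldl tnmsStep (tnmsStep (r, m, pre, par, val) c) cs) =
          (PySem.Chars.split₀.go cs ((seen ++ [c]).reverse) []).foldl tnmsTok
            (tnmsStep (r, m, pre, par, val) c).1 :=
        hIH0 (seen ++ [c]) h2
      rw [hIH, h1]
      simp

-- ===== VERDICT (by name: the statement is the Claim_ definition above) =====
theorem convertTNMSStringToDict_spec : Claim_equal_convertTNMSStringToDict := by
  intro s _
  unfold Spec_convertTNMSStringToDict convertTNMSStringToDict convertTNMSStringToDict_alt
  rw [tnms_main s.toList PySem.Dict.empty 0 [] [] [] [] (by simp [TnmsInv])]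
  rfl
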